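-- pv_equiv track=rewrite | github.com/miliar/Code_Jam_Webscraper | solutions_python/solutions_year17_round0_nr3/125.py | func
-- ===== SOURCE A (Python) =====
-- def func(n, k):
-- 	#if n == 1 and k == 1:
-- 	#	return (0,0)
-- 	#elif n == 2 and k == 1:
-- 	#	return (1,0)
-- 	if n == 0:
-- 		return (0,0)
-- 	elif k == 1:
-- 		return (n//2, n//2 - 1 + n%2)
-- 	elif n%2  == 1:
-- 		return func(n//2, (k -1 + 1)//2 )
-- 	elif k%2 == 1:
-- 		return func(n//2 - 1, k//2)
-- 	else:
-- 		return func(n//2, k//2 )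
-- 	return
-- ===== SOURCE B (Python) =====
-- def func(n, k):
--     if n == 0 or k < 1:
--         return (0, 0)
--     bits = []
--     while k > 1:
--         bits.append(k % 2)
--         k //= 2
--     s = n
--     for b in bits:
--         s = (s - 1) // 2 if s % 2 == 1 else s // 2 - b
--     if s <= 0:
--         return (0, 0)
--     return (s // 2, (s - 1) // 2)
-- ===== Notes on version B (the rewrite author's own statement) =====
-- stated objective: alternative
-- what changed: Replaces the two-variable (n,k) recursion by first extracting k's binary digits low-to-high and then folding a single gap-size accumulator over that digit list, finishing with one closed-form split of the final gap.
-- outside the precondition, e.g. on func(-60, 2): A returns (-15, -16), B returns (0, 0)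
import Mathlib
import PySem

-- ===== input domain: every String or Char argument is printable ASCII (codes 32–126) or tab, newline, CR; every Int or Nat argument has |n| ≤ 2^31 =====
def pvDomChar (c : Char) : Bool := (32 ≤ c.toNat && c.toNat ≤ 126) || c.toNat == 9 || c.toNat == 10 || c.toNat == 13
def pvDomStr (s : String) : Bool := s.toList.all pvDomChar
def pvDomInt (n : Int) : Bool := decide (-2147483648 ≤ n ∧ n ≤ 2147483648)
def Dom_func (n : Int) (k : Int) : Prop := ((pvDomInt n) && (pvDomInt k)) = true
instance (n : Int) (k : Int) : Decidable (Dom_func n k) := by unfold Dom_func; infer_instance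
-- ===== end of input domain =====

-- B replaces the (n,k) recursion by a fold of a gap-size accumulator over k's binary digits
-- (objective: alternative decomposition; return values only — no side effects involved).

-- ===== PORT A =====
-- fuel-guarded transcription of A's recursion (fuel only makes it total; inside Pre_ the
-- recursion depth is at most log2 n + 1 ≤ 33 < 64, so the fuel is never exhausted)
def funcAux : Nat → Int → Int → Int × Int
  | 0, _, _ => (0, 0)
  | fuel+1, n, k =>
    if n == 0 then (0, 0)
    else if k == 1 then (PySem.Int.floordiv n 2, PySem.Int.floordiv n 2 - 1 + PySem.Int.mod n 2)
    else if PySem.Int.mod n 2 == 1 then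
      funcAux fuel (PySem.Int.floordiv n 2) (PySem.Int.floordiv (k - 1 + 1) 2)
    else if PySem.Int.mod k 2 == 1 then
      funcAux fuel (PySem.Int.floordiv n 2 - 1) (PySem.Int.floordiv k 2)
    else
      funcAux fuel (PySem.Int.floordiv n 2) (PySem.Int.floordiv k 2)

def func (n : Int) (k : Int) : Int × Int := funcAux 64 n k

-- ===== PORT B =====
-- k's binary digits, low to high, excluding the leading 1 (the `while k > 1` loop of Source B)
def bitsOf (k : Int) : List Int :=
  if _h1k : 1 < k then PySem.Int.mod k 2 :: bitsOf (PySem.Int.floordiv k 2) else []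
termination_by k.toNat
decreasing_by
  have h2 : PySem.Int.floordiv k 2 = k / 2 := PySem.Int.floordiv_eq_ediv_of_pos (by omega)
  rw [h2]; omega

-- one split of the current gap s, steered by digit b (the loop body of Source B)
def split (s b : Int) : Int :=
  if PySem.Int.mod s 2 == 1 then PySem.Int.floordiv (s - 1) 2 else PySem.Int.floordiv s 2 - b

def func_alt (n : Int) (k : Int) : Int × Int :=
  if n == 0 || k < 1 then (0, 0)
  else
    let s := (bitsOf k).foldl split n
    if s ≤ 0 then (0, 0) else (PySem.Int.floordiv s 2, PySem.Int.floordiv (s - 1) 2)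

-- ===== PRECONDITION & SPEC =====
-- Pre_ excludes negative n (a negative stall count), where A diverges when k ≤ 0 and, when
-- k ≥ 1, returns a floor-division artefact of its implementation that B does not reproduce.
def Pre_func (n : Int) (k : Int) : Prop := 0 ≤ n
instance (n : Int) (k : Int) : Decidable (Pre_func n k) := by unfold Pre_func; infer_instance
def pvWitness_func : Int × Int := (7, 3)

def Spec_func (n : Int) (k : Int) (out : Int × Int) : Prop := out = func_alt n k
instance (n : Int) (k : Int) (out : Int × Int) : Decidable (Spec_func n k out) := by
  unfold Spec_func; infer_instance

-- ===== CLAIM (what is proved, stated in full; the proofs are below) =====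
def Claim_equal_func : Prop := ∀ (n : Int) (k : Int), Dom_func n k → Pre_func n k → Spec_func n k (func n k)

-- ===== LEMMAS AND PROOFS =====

theorem bitsOf_elem : ∀ (k b : Int), b ∈ bitsOf k → b = 0 ∨ b = 1 := by
  intro k
  induction k using bitsOf.induct with
  | case1 k _h1k ih =>
    intro b hb
    rw [bitsOf, dif_pos _h1k] at hb
    rcases List.mem_cons.1 hb with h1 | h1
    · subst h1
      have := PySem.Int.mod_eq_emod_of_pos (a := k) (b := 2) (by omega)
      rw [this]; omega
    · exact ih b h1
  | case2 k _h1k =>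
    intro b hb
    rw [bitsOf, dif_neg _h1k] at hb
    simp at hb

theorem split_nonpos (s b : Int) (hs : s ≤ 0) (hb : 0 ≤ b) : split s b ≤ 0 := by
  unfold split
  have hm : PySem.Int.mod s 2 = s % 2 := PySem.Int.mod_eq_emod_of_pos (by omega)
  have hd : PySem.Int.floordiv (s - 1) 2 = (s - 1) / 2 := PySem.Int.floordiv_eq_ediv_of_pos (by omega)
  have hd2 : PySem.Int.floordiv s 2 = s / 2 := PySem.Int.floordiv_eq_ediv_of_pos (by omega)
  rw [hm, hd, hd2]
  split <;> omega

theorem foldl_split_nonpos (l : List Int) : ∀ (s : Int), (∀ b ∈ l, 0 ≤ b) → s ≤ 0 →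
    l.foldl split s ≤ 0 := by
  induction l with
  | nil => intro s _ hs; simpa using hs
  | cons b t ih =>
    intro s hb hs
    simp only [List.foldl_cons]
    exact ih _ (fun c hc => hb c (List.mem_cons_of_mem _ hc))
      (split_nonpos s b hs (hb b (List.mem_cons_self)))

theorem bitsOf_nonneg (k b : Int) (hb : b ∈ bitsOf k) : 0 ≤ b := by
  rcases bitsOf_elem k b hb with h | h <;> omega

-- the final gap at the k = 1 base case: A's pair equals B's finishing pair
theorem base_pair (n : Int) (hn : 1 ≤ n) :
    (PySem.Int.floordiv n 2, PySem.Int.floordiv n 2 - 1 + PySem.Int.mod n 2)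
      = (PySem.Int.floordiv n 2, PySem.Int.floordiv (n - 1) 2) := by
  have hm : PySem.Int.mod n 2 = n % 2 := PySem.Int.mod_eq_emod_of_pos (by omega)
  have hd : PySem.Int.floordiv n 2 = n / 2 := PySem.Int.floordiv_eq_ediv_of_pos (by omega)
  have hd1 : PySem.Int.floordiv (n - 1) 2 = (n - 1) / 2 := PySem.Int.floordiv_eq_ediv_of_pos (by omega)
  rw [hm, hd, hd1]
  have : n / 2 - 1 + n % 2 = (n - 1) / 2 := by omega
  rw [this]

-- when k ≤ 0 the recursion of A never meets its k = 1 base and exhausts n, returning (0,0)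
theorem funcAux_k_nonpos : ∀ (fuel : Nat) (n k : Int), 0 ≤ n → n < 2 ^ fuel → k ≤ 0 →
    funcAux fuel n k = (0, 0) := by
  intro fuel
  induction fuel with
  | zero => intro n k _ _ _; rfl
  | succ fuel ih =>
    intro n k hn hlt hk
    have hm : PySem.Int.mod n 2 = n % 2 := PySem.Int.mod_eq_emod_of_pos (by omega)
    have hmk : PySem.Int.mod k 2 = k % 2 := PySem.Int.mod_eq_emod_of_pos (by omega)
    have hd : PySem.Int.floordiv n 2 = n / 2 := PySem.Int.floordiv_eq_ediv_of_pos (by omega)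
    have hdk : PySem.Int.floordiv k 2 = k / 2 := PySem.Int.floordiv_eq_ediv_of_pos (by omega)
    have hdk1 : PySem.Int.floordiv (k - 1 + 1) 2 = k / 2 := by
      have : k - 1 + 1 = k := by omega
      rw [this, hdk]
    rw [funcAux]
    by_cases h0 : n = 0
    · simp [h0]
    · rw [if_neg (by simpa using h0), if_neg (by simp; omega)]
      have hp : (2:Int) ^ fuel > 0 := by positivity
      have hlt' : n < 2 ^ (fuel + 1) := hlt
      have hpow : (2:Int) ^ (fuel + 1) = 2 * 2 ^ fuel := by ring
      by_cases hodd : n % 2 = 1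
      · rw [if_pos (by simp [hm, hodd]), hd, hdk1]
        exact ih _ _ (by omega) (by omega) (by omega)
      · rw [if_neg (by simp [hm, hodd])]
        by_cases hko : k % 2 = 1
        · rw [if_pos (by simp [hmk, hko]), hd, hdk]
          exact ih _ _ (by omega) (by omega) (by omega)
        · rw [if_neg (by simp [hmk, hko]), hd, hdk]
          exact ih _ _ (by omega) (by omega) (by omega)

-- main invariant: for k ≥ 1 the recursion of A computes B's fold over k's digits
theorem funcAux_eq_fold : ∀ (fuel : Nat) (n k : Int), 0 ≤ n → n < 2 ^ fuel → 1 ≤ k →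
    funcAux fuel n k =
      (if (bitsOf k).foldl split n ≤ 0 then ((0:Int), (0:Int))
       else (PySem.Int.floordiv ((bitsOf k).foldl split n) 2,
             PySem.Int.floordiv ((bitsOf k).foldl split n - 1) 2)) := by
  intro fuel
  induction fuel with
  | zero =>
    intro n k hn hlt hk
    have h0 : n = 0 := by simp at hlt; omega
    subst h0
    have : (bitsOf k).foldl split 0 ≤ 0 :=
      foldl_split_nonpos _ 0 (fun b hb => bitsOf_nonneg k b hb) (le_refl 0)
    rw [if_pos this]; rfl
  | succ fuel ih =>
    intro n k hn hlt hk
    have hm : PySem.Int.mod n 2 = n % 2 := PySem.Int.mod_eq_emod_of_pos (by omega)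
    have hmk : PySem.Int.mod k 2 = k % 2 := PySem.Int.mod_eq_emod_of_pos (by omega)
    have hd : PySem.Int.floordiv n 2 = n / 2 := PySem.Int.floordiv_eq_ediv_of_pos (by omega)
    have hdk : PySem.Int.floordiv k 2 = k / 2 := PySem.Int.floordiv_eq_ediv_of_pos (by omega)
    by_cases h0 : n = 0
    · subst h0
      have : (bitsOf k).foldl split 0 ≤ 0 :=
        foldl_split_nonpos _ 0 (fun b hb => bitsOf_nonneg k b hb) (le_refl 0)
      rw [if_pos this, funcAux, if_pos (by simp)]
    · have hn1 : 1 ≤ n := by omega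
      by_cases hk1 : k = 1
      · subst hk1
        have hb : bitsOf 1 = [] := by rw [bitsOf, dif_neg (by omega)]
        rw [hb]
        simp only [List.foldl_nil]
        rw [if_neg (by omega)]
        rw [funcAux, if_neg (by simpa using h0), if_pos (by simp)]
        exact base_pair n hn1
      · -- k ≥ 2: one digit of k is consumed, one split of the gap is performed
        have hk2 : 2 ≤ k := by omega
        have hb : bitsOf k = PySem.Int.mod k 2 :: bitsOf (PySem.Int.floordiv k 2) := by
          rw [bitsOf, dif_pos (by omega)]
        have hk2' : 1 ≤ k / 2 := by omega
        have hpow : (2:Int) ^ (fuel + 1) = 2 * 2 ^ fuel := by ring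
        rw [hb]
        simp only [List.foldl_cons]
        rw [funcAux, if_neg (by simpa using h0), if_neg (by simp; omega)]
        have hdk1 : PySem.Int.floordiv (k - 1 + 1) 2 = PySem.Int.floordiv k 2 := by
          have : k - 1 + 1 = k := by omega
          rw [this]
        by_cases hodd : n % 2 = 1
        · rw [if_pos (by simp [hodd]), hdk1]
          have hsplit : split n (PySem.Int.mod k 2) = PySem.Int.floordiv n 2 := by
            unfold split
            rw [if_pos (by simp [hm, hodd])]
            rw [PySem.Int.floordiv_eq_ediv_of_pos (a := n - 1) (b := 2) (by omega), hd]
            omega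
          have hv : split n (PySem.Int.mod k 2) = n / 2 := by rw [hsplit, hd]
          rw [← hsplit]
          exact ih _ _ (by rw [hv]; omega) (by rw [hv]; omega) (by rw [hdk]; exact hk2')
        · rw [if_neg (by simp [hm, hodd])]
          by_cases hko : k % 2 = 1
          · rw [if_pos (by simp [hko]), hdk]
            have hsplit : split n (PySem.Int.mod k 2) = PySem.Int.floordiv n 2 - 1 := by
              unfold split
              rw [if_neg (by simp [hm, hodd]), hmk, hko]
            rw [← hsplit]
            have hv : split n (PySem.Int.mod k 2) = n / 2 - 1 := by rw [hsplit, hd]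
            exact ih _ _ (by rw [hv]; omega) (by rw [hv]; omega) hk2'
          · rw [if_neg (by simp [hmk, hko]), hdk]
            have hsplit : split n (PySem.Int.mod k 2) = PySem.Int.floordiv n 2 := by
              unfold split
              rw [if_neg (by simp [hm, hodd]), hmk]
              have : k % 2 = 0 := by omega
              rw [this]; ring
            rw [← hsplit]
            have hv : split n (PySem.Int.mod k 2) = n / 2 := by rw [hsplit, hd]
            exact ih _ _ (by rw [hv]; omega) (by rw [hv]; omega) hk2'

-- ===== VERDICT (by name: the statement is the Claim_ definition above) =====
theorem func_spec : Claim_equal_func := by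
  intro n k hdom hpre
  unfold Spec_func func func_alt
  have hn : 0 ≤ n := hpre
  have hbnd : n < 2 ^ (64 : Nat) := by
    unfold Dom_func pvDomInt at hdom
    simp at hdom
    have : (2147483648 : Int) < 2 ^ (64 : Nat) := by norm_num
    omega
  by_cases h0 : n = 0
  · subst h0
    simp only [if_pos (by simp : ((0:Int) == 0 || k < 1) = true)]
    by_cases hk : 1 ≤ k
    · rw [funcAux_eq_fold 64 0 k hn hbnd hk]
      have : (bitsOf k).foldl split 0 ≤ 0 :=
        foldl_split_nonpos _ 0 (fun b hb => bitsOf_nonneg k b hb) (le_refl 0)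
      rw [if_pos this]
    · exact funcAux_k_nonpos 64 0 k hn hbnd (by omega)
  · by_cases hk : 1 ≤ k
    · rw [if_neg (by simp [h0]; omega)]
      exact funcAux_eq_fold 64 n k hn hbnd hk
    · rw [if_pos (by simp; omega)]
      exact funcAux_k_nonpos 64 n k hn hbnd (by omega)
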